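-- pv_equiv track=rewrite | github.com/hades/aoc23 | aoc23/day13.py | is_mirrored_y
-- ===== SOURCE A (Python) =====
-- def is_mirrored_y(pattern: set[tuple[int, int]], max_x: int, max_y: int,
--                   y_mirror: int, desired_errors: int = 0) -> bool:
--   min_y = max(0, 2 * y_mirror - max_y)
--   max_y = min(max_y, 2 * y_mirror)
--   errors = 0
--   for x in range(max_x):
--     for y in range(min_y, y_mirror):
--       mirrored = 2 * y_mirror - y - 1
--       if (x, y) in pattern and (x, mirrored) not in pattern:
--         errors += 1
--       if (x, y) not in pattern and (x, mirrored) in pattern: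
--         errors += 1
--       if errors > desired_errors:
--         return False
--   return errors == desired_errors
-- ===== SOURCE B (Python) =====
-- def is_mirrored_y(pattern: set[tuple[int, int]], max_x: int, max_y: int,
--                   y_mirror: int, desired_errors: int = 0) -> bool:
--   # One pass over the pattern set instead of scanning the whole grid:
--   # a mismatched mirror pair is counted once, at whichever of its two cells
--   # is present in the pattern (exactly one is, when they mismatch).
--   lo = max(0, 2 * y_mirror - max_y)
--   hi = min(max_y, 2 * y_mirror)
--   errors = 0
--   for (x, y) in pattern:
--     if 0 <= x < max_x and lo <= y < hi and (x, 2 * y_mirror - y - 1) not in pattern: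
--       errors += 1
--   return errors == desired_errors
-- ===== Notes on version B (the rewrite author's own statement) =====
-- stated objective: faster
-- what changed: Instead of scanning every grid cell in the mirrored band with an early exit, B makes a single pass over the pattern set, counting each mismatched mirror pair at its unique present cell; Pre_ only requires the pattern list to be duplicate-free, since the Python argument is a set and only duplicate-free lists encode one.
import Mathlib
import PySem

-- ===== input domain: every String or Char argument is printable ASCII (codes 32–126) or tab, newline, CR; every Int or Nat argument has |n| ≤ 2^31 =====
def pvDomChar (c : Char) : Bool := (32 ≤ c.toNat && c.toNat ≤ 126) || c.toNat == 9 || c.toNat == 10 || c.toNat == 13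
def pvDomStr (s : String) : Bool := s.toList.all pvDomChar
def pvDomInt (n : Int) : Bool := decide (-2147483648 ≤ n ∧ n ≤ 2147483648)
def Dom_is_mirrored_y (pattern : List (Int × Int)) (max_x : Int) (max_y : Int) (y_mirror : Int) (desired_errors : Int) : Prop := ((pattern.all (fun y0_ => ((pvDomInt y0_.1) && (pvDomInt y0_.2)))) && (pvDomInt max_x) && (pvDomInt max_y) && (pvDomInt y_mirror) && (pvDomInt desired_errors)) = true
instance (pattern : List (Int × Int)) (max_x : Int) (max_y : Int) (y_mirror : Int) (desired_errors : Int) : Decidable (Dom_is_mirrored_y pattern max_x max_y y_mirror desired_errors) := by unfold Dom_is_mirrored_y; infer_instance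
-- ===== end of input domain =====

-- B replaces A's scan of the whole mirrored grid band by a single pass over the
-- pattern set (each mismatched mirror pair is counted at its unique present cell);
-- objective: faster (O(|pattern|) membership passes instead of O(max_x * band) grid cells).

-- ===== PORT A =====
-- A-side helpers: the inner-loop body and the row loop of A, named for the proofs.
def aStep (pattern : List (Int × Int)) (y_mirror desired_errors x : Int)
    (st : Option Int) (y : Int) : Option Int :=
  match st with
  | none => none
  | some errors =>
    let mirrored := 2 * y_mirror - y - 1
    let errors := if PySem.Set.contains pattern (x, y) && !(PySem.Set.contains pattern (x, mirrored)) then errors + 1 else errors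
    let errors := if !(PySem.Set.contains pattern (x, y)) && PySem.Set.contains pattern (x, mirrored) then errors + 1 else errors
    if errors > desired_errors then none else some errors

def aRow (pattern : List (Int × Int)) (y_mirror desired_errors min_y : Int)
    (st : Option Int) (x : Int) : Option Int :=
  (PySem.List.pyRange min_y y_mirror 1).foldl (aStep pattern y_mirror desired_errors x) st

def is_mirrored_y (pattern : List (Int × Int)) (max_x : Int) (max_y : Int) (y_mirror : Int) (desired_errors : Int) : Bool :=
  let min_y := max 0 (2 * y_mirror - max_y)
  let _max_y := min max_y (2 * y_mirror)  -- Python rebinds max_y; the value is never read afterwards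
  match (PySem.List.pyRange 0 max_x 1).foldl (aRow pattern y_mirror desired_errors min_y) (some 0) with
  | none => false
  | some errors => errors == desired_errors

-- ===== PORT B =====
-- B-side helpers: the test applied to each pattern point, and the fold body.
def bCond (pattern : List (Int × Int)) (max_x lo hi y_mirror : Int) (p : Int × Int) : Bool :=
  decide (0 ≤ p.1) && decide (p.1 < max_x) && decide (lo ≤ p.2) && decide (p.2 < hi) &&
    !(PySem.Set.contains pattern (p.1, 2 * y_mirror - p.2 - 1))

def bStep (pattern : List (Int × Int)) (max_x lo hi y_mirror : Int)
    (errors : Int) (p : Int × Int) : Int :=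
  if bCond pattern max_x lo hi y_mirror p then errors + 1 else errors

def is_mirrored_y_alt (pattern : List (Int × Int)) (max_x : Int) (max_y : Int) (y_mirror : Int) (desired_errors : Int) : Bool :=
  let lo := max 0 (2 * y_mirror - max_y)
  let hi := min max_y (2 * y_mirror)
  (pattern.foldl (bStep pattern max_x lo hi y_mirror) 0) == desired_errors

-- ===== PRECONDITION & SPEC =====
-- Pre_ requires pattern to have no duplicates: the Python argument is a set, and only
-- duplicate-free lists encode a set under the type convention (A reads the list only
-- through membership, B iterates it once, so duplicate entries are outside the encoding).
def Pre_is_mirrored_y (pattern : List (Int × Int)) (max_x : Int) (max_y : Int) (y_mirror : Int) (desired_errors : Int) : Prop :=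
  pattern.Nodup
instance (pattern : List (Int × Int)) (max_x : Int) (max_y : Int) (y_mirror : Int) (desired_errors : Int) : Decidable (Pre_is_mirrored_y pattern max_x max_y y_mirror desired_errors) := by unfold Pre_is_mirrored_y; infer_instance

def pvWitness_is_mirrored_y : (List (Int × Int)) × Int × Int × Int × Int :=
  ([((0 : Int), (0 : Int)), ((0 : Int), (1 : Int))], 1, 2, 1, 0)

def Spec_is_mirrored_y (pattern : List (Int × Int)) (max_x : Int) (max_y : Int) (y_mirror : Int) (desired_errors : Int) (out : Bool) : Prop := out = is_mirrored_y_alt pattern max_x max_y y_mirror desired_errors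
instance (pattern : List (Int × Int)) (max_x : Int) (max_y : Int) (y_mirror : Int) (desired_errors : Int) (out : Bool) : Decidable (Spec_is_mirrored_y pattern max_x max_y y_mirror desired_errors out) := by unfold Spec_is_mirrored_y; infer_instance

-- ===== CLAIM (what is proved, stated in full; the proofs are below) =====
def Claim_equal_is_mirrored_y : Prop := ∀ (pattern : List (Int × Int)) (max_x : Int) (max_y : Int) (y_mirror : Int) (desired_errors : Int), Dom_is_mirrored_y pattern max_x max_y y_mirror desired_errors → Pre_is_mirrored_y pattern max_x max_y y_mirror desired_errors → Spec_is_mirrored_y pattern max_x max_y y_mirror desired_errors (is_mirrored_y pattern max_x max_y y_mirror desired_errors)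

-- ===== LEMMAS AND PROOFS =====

-- 0/1 indicators for a mismatched mirror pair, seen from the lower cell (ind1)
-- and from the upper cell (ind2).
def ind1 (s : List (Int × Int)) (m x y : Int) : Int :=
  if (x, y) ∈ s ∧ (x, 2 * m - y - 1) ∉ s then 1 else 0
def ind2 (s : List (Int × Int)) (m x y : Int) : Int :=
  if (x, 2 * m - y - 1) ∈ s ∧ (x, y) ∉ s then 1 else 0

theorem ind1_nonneg (s : List (Int × Int)) (m x y : Int) : 0 ≤ ind1 s m x y := by
  unfold ind1; split_ifs <;> omega
theorem ind2_nonneg (s : List (Int × Int)) (m x y : Int) : 0 ≤ ind2 s m x y := by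
  unfold ind2; split_ifs <;> omega

theorem aStep_some (s : List (Int × Int)) (m d x e y : Int) :
    aStep s m d x (some e) y =
      if d < e + (ind1 s m x y + ind2 s m x y) then none
      else some (e + (ind1 s m x y + ind2 s m x y)) := by
  by_cases h1 : (x, y) ∈ s <;> by_cases h2 : (x, 2 * m - y - 1) ∈ s <;>
    simp [aStep, ind1, ind2, h1, h2]

theorem foldl_aStep_none (s : List (Int × Int)) (m d x : Int) (ys : List Int) :
    ys.foldl (aStep s m d x) none = none := by
  induction ys with
  | nil => rfl
  | cons y ys ih => simpa [aStep] using ih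

theorem sum_inds_nonneg (s : List (Int × Int)) (m x : Int) (ys : List Int) :
    0 ≤ ((ys.map (fun y => ind1 s m x y + ind2 s m x y)).sum) := by
  apply List.sum_nonneg
  intro a ha
  obtain ⟨y, _, rfl⟩ := List.mem_map.mp ha
  have := ind1_nonneg s m x y
  have := ind2_nonneg s m x y
  omega

theorem foldl_aStep (s : List (Int × Int)) (m d x : Int) (ys : List Int) : ∀ e : Int,
    ys.foldl (aStep s m d x) (some e) =
      if ys ≠ [] ∧ d < e + ((ys.map (fun y => ind1 s m x y + ind2 s m x y)).sum) then none
      else some (e + ((ys.map (fun y => ind1 s m x y + ind2 s m x y)).sum)) := by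
  induction ys with
  | nil => intro e; simp
  | cons y ys ih =>
    intro e
    have hnn := sum_inds_nonneg s m x ys
    rw [List.foldl_cons, aStep_some]
    by_cases h : d < e + (ind1 s m x y + ind2 s m x y)
    · rw [if_pos h, foldl_aStep_none]
      rw [if_pos]
      refine ⟨by simp, ?_⟩
      simp only [List.map_cons, List.sum_cons]
      omega
    · rw [if_neg h, ih]
      simp only [List.map_cons, List.sum_cons, ne_eq]
      by_cases hys : ys = []
      · subst hys; simp; omega
      · by_cases hd : d < e + (ind1 s m x y + ind2 s m x y) + (ys.map (fun y => ind1 s m x y + ind2 s m x y)).sum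
        · rw [if_pos ⟨hys, hd⟩, if_pos ⟨by simp, by omega⟩]
        · rw [if_neg (by tauto), if_neg (by simp only [not_and]; intro; omega)]
          congr 1; omega

-- per-row total
def rowSum (s : List (Int × Int)) (m lo x : Int) : Int :=
  ((PySem.List.pyRange lo m 1).map (fun y => ind1 s m x y + ind2 s m x y)).sum

theorem rowSum_nonneg (s : List (Int × Int)) (m lo x : Int) : 0 ≤ rowSum s m lo x :=
  sum_inds_nonneg s m x _

theorem foldl_aRow_none (s : List (Int × Int)) (m d lo : Int) (xs : List Int) :
    xs.foldl (aRow s m d lo) none = none := by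
  induction xs with
  | nil => rfl
  | cons x xs ih => simpa [aRow, foldl_aStep_none] using ih

theorem sum_rowSum_nonneg (s : List (Int × Int)) (m lo : Int) (xs : List Int) :
    0 ≤ (xs.map (rowSum s m lo)).sum := by
  apply List.sum_nonneg
  intro a ha
  obtain ⟨x, _, rfl⟩ := List.mem_map.mp ha
  exact rowSum_nonneg s m lo x

theorem foldl_aRow (s : List (Int × Int)) (m d lo : Int) (xs : List Int)
    (hys : PySem.List.pyRange lo m 1 ≠ []) : ∀ e : Int,
    xs.foldl (aRow s m d lo) (some e) =
      if xs ≠ [] ∧ d < e + ((xs.map (rowSum s m lo)).sum) then none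
      else some (e + ((xs.map (rowSum s m lo)).sum)) := by
  induction xs with
  | nil => intro e; simp
  | cons x xs ih =>
    intro e
    have hnn := sum_rowSum_nonneg s m lo xs
    have hrow : aRow s m d lo (some e) x =
        if d < e + rowSum s m lo x then none else some (e + rowSum s m lo x) := by
      simp only [aRow, foldl_aStep, rowSum, ne_eq, hys, not_false_eq_true, true_and]
    rw [List.foldl_cons, hrow]
    have hr := rowSum_nonneg s m lo x
    by_cases h : d < e + rowSum s m lo x
    · rw [if_pos h, foldl_aRow_none, if_pos ⟨by simp, by simp only [List.map_cons, List.sum_cons]; omega⟩]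
    · rw [if_neg h, ih]
      simp only [List.map_cons, List.sum_cons, ne_eq]
      by_cases hxs : xs = []
      · subst hxs; simp; omega
      · by_cases hd : d < e + rowSum s m lo x + (xs.map (rowSum s m lo)).sum
        · rw [if_pos ⟨hxs, hd⟩, if_pos ⟨by simp, by omega⟩]
        · rw [if_neg (by tauto), if_neg (by simp only [not_and]; intro; omega)]
          congr 1; omega

-- A's value is "total mismatch count over the scanned band equals desired".
theorem A_char (s : List (Int × Int)) (mx my m d : Int) :
    is_mirrored_y s mx my m d =
      ((((PySem.List.pyRange 0 mx 1).map (rowSum s m (max 0 (2 * m - my)))).sum) == d) := by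
  unfold is_mirrored_y
  set lo := max 0 (2 * m - my) with hlo
  change (match (PySem.List.pyRange 0 mx 1).foldl (aRow s m d lo) (some 0) with
    | none => false
    | some errors => errors == d) = _
  by_cases hys : PySem.List.pyRange lo m 1 = []
  · have hrow : ∀ st x, aRow s m d lo st x = st := by
      intro st x; rw [aRow, hys]; rfl
    have hfold : ∀ (xs : List Int), xs.foldl (aRow s m d lo) (some 0) = some 0 := by
      intro xs; induction xs with
      | nil => rfl
      | cons x xs ih => rw [List.foldl_cons, hrow]; exact ih
    have hsum : ((PySem.List.pyRange 0 mx 1).map (rowSum s m lo)).sum = 0 := by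
      apply List.sum_eq_zero
      intro a ha
      obtain ⟨x, _, rfl⟩ := List.mem_map.mp ha
      simp [rowSum, hys]
    rw [hfold, hsum]
  · rw [foldl_aRow s m d lo _ hys 0]
    set T := ((PySem.List.pyRange 0 mx 1).map (rowSum s m lo)).sum with hT
    by_cases hcond : PySem.List.pyRange 0 mx 1 ≠ [] ∧ d < 0 + T
    · rw [if_pos hcond]
      have : ¬ (T = d) := by omega
      simp [this]
    · rw [if_neg hcond]; simp

-- B's value is "countP over the pattern equals desired".
theorem B_char (s : List (Int × Int)) (mx my m d : Int) :
    is_mirrored_y_alt s mx my m d =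
      (((s.countP (bCond s mx (max 0 (2 * m - my)) (min my (2 * m)) m) : Int)) == d) := by
  unfold is_mirrored_y_alt
  change (s.foldl (bStep s mx (max 0 (2 * m - my)) (min my (2 * m)) m) 0 == d) = _
  have h : ∀ (l : List (Int × Int)) (a : Int),
      l.foldl (bStep s mx (max 0 (2 * m - my)) (min my (2 * m)) m) a =
        a + (l.countP (bCond s mx (max 0 (2 * m - my)) (min my (2 * m)) m) : Int) := by
    intro l
    induction l with
    | nil => intro a; simp
    | cons p l ih =>
      intro a
      rw [List.foldl_cons, List.countP_cons]
      by_cases hp : bCond s mx (max 0 (2 * m - my)) (min my (2 * m)) m p = true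
      · simp [bStep, hp, ih]; push_cast; ring
      · simp [bStep, hp, ih]
  rw [h]; simp

-- list sums over pyRange are Finset sums over Ico
theorem pyRange_toFinset (a b : Int) :
    (PySem.List.pyRange a b 1).toFinset = Finset.Ico a b := by
  ext z
  simp [PySem.List.mem_pyRange_one, Finset.mem_Ico]

theorem sum_pyRange (a b : Int) (f : Int → Int) :
    ((PySem.List.pyRange a b 1).map f).sum = ∑ y ∈ Finset.Ico a b, f y := by
  rw [← List.sum_toFinset f (PySem.List.nodup_pyRange_one a b), pyRange_toFinset]

-- reflecting the upper half of the band onto the lower half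
theorem reindex (s : List (Int × Int)) (m lo x : Int) :
    ∑ y ∈ Finset.Ico lo m, ind2 s m x y = ∑ y ∈ Finset.Ico m (2 * m - lo), ind1 s m x y := by
  apply Finset.sum_nbij' (i := fun y => 2 * m - 1 - y) (j := fun y => 2 * m - 1 - y)
  · intro a ha; simp only [Finset.mem_Ico] at *; omega
  · intro a ha; simp only [Finset.mem_Ico] at *; omega
  · intro a _; omega
  · intro a _; omega
  · intro a _
    unfold ind1 ind2
    have h : 2 * m - (2 * m - 1 - a) - 1 = a := by ring
    have h2 : 2 * m - 1 - a = 2 * m - a - 1 := by ring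
    rw [h, h2]

theorem band_merge (s : List (Int × Int)) (m my x : Int) :
    ∑ y ∈ Finset.Ico (max 0 (2 * m - my)) m, (ind1 s m x y + ind2 s m x y) =
      ∑ y ∈ Finset.Ico (max 0 (2 * m - my)) (min my (2 * m)), ind1 s m x y := by
  set lo := max 0 (2 * m - my) with hlo
  set hi := min my (2 * m) with hhi
  have h2 : 2 * m - lo = hi := by omega
  rw [Finset.sum_add_distrib, reindex, h2]
  by_cases hcase : lo ≤ m ∧ m ≤ hi
  · rw [← Finset.Ico_union_Ico_eq_Ico hcase.1 hcase.2,
        Finset.sum_union (Finset.Ico_disjoint_Ico_consecutive lo m hi)]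
  · have e1 : Finset.Ico lo m = ∅ := Finset.Ico_eq_empty (by omega)
    have e2 : Finset.Ico m hi = ∅ := Finset.Ico_eq_empty (by omega)
    have e3 : Finset.Ico lo hi = ∅ := Finset.Ico_eq_empty (by omega)
    rw [e1, e2, e3]; simp

-- counting over the grid equals counting over the (duplicate-free) pattern list
theorem grid_count (s : List (Int × Int)) (hs : s.Nodup) (mx lo hi m : Int) :
    ∑ x ∈ Finset.Ico 0 mx, ∑ y ∈ Finset.Ico lo hi, ind1 s m x y =
      (s.countP (bCond s mx lo hi m) : Int) := by
  have hsum : ∑ x ∈ Finset.Ico 0 mx, ∑ y ∈ Finset.Ico lo hi, ind1 s m x y =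
      ∑ z ∈ Finset.Ico 0 mx ×ˢ Finset.Ico lo hi,
        (if (z.1, z.2) ∈ s ∧ (z.1, 2 * m - z.2 - 1) ∉ s then (1 : Int) else 0) := by
    rw [Finset.sum_product]
    rfl
  rw [hsum, Finset.sum_boole]
  have hcount : s.countP (bCond s mx lo hi m) =
      (s.toFinset.filter (fun p => bCond s mx lo hi m p)).card := by
    rw [← List.toFinset_filter, List.toFinset_card_of_nodup (hs.filter _), List.countP_eq_length_filter]
  rw [hcount]
  congr 2
  apply Finset.ext
  rintro ⟨x, y⟩
  simp only [Finset.mem_filter, Finset.mem_product, Finset.mem_Ico, List.mem_toFinset,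
    bCond, Bool.and_eq_true, decide_eq_true_eq, Bool.not_eq_true',
    PySem.Set.contains_eq_listContains]
  constructor
  · rintro ⟨⟨hx, hy⟩, hmem, hnot⟩
    refine ⟨hmem, ⟨⟨⟨hx.1, hx.2⟩, hy.1⟩, hy.2⟩, ?_⟩
    simp only [List.contains_eq_mem]
    exact decide_eq_false hnot
  · rintro ⟨hmem, ⟨⟨⟨hx0, hx1⟩, hy0⟩, hy1⟩, hnot⟩
    refine ⟨⟨⟨hx0, hx1⟩, ⟨hy0, hy1⟩⟩, hmem, ?_⟩
    simp only [List.contains_eq_mem, decide_eq_false_iff_not] at hnot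
    exact hnot

-- ===== VERDICT (by name: the statement is the Claim_ definition above) =====
theorem is_mirrored_y_spec : Claim_equal_is_mirrored_y := by
  intro s mx my m d _hdom hpre
  unfold Spec_is_mirrored_y
  rw [A_char, B_char]
  congr 1
  calc ((PySem.List.pyRange 0 mx 1).map (rowSum s m (max 0 (2 * m - my)))).sum
      = ∑ x ∈ Finset.Ico 0 mx, rowSum s m (max 0 (2 * m - my)) x := sum_pyRange _ _ _
    _ = ∑ x ∈ Finset.Ico 0 mx, ∑ y ∈ Finset.Ico (max 0 (2 * m - my)) m,
          (ind1 s m x y + ind2 s m x y) := by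
        apply Finset.sum_congr rfl
        intro x _
        exact sum_pyRange _ _ _
    _ = ∑ x ∈ Finset.Ico 0 mx, ∑ y ∈ Finset.Ico (max 0 (2 * m - my)) (min my (2 * m)),
          ind1 s m x y := by
        apply Finset.sum_congr rfl
        intro x _
        exact band_merge s m my x
    _ = (s.countP (bCond s mx (max 0 (2 * m - my)) (min my (2 * m)) m) : Int) :=
        grid_count s hpre mx _ _ m
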